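-- pv_equiv track=rewrite | github.com/daniter-cu/CorefCoherence | coref.py | find_entry
-- ===== SOURCE A (Python) =====
-- def find_entry(word, term_to_index):
--     '''Utility function to find index numbers by pronoun.
--        Index numbers refer to LIWC classes.'''
--     if word in term_to_index.keys():
--         return term_to_index[word]
--     else:
--         for i in range(len(word), 0,-1):
--             if word[:i]+"*" in term_to_index.keys():
--                 return term_to_index[word[:i]+"*"]
--     return []
-- ===== SOURCE B (Python) =====
-- def find_entry(word, term_to_index):
--     '''Utility function to find index numbers by pronoun.
--        Index numbers refer to LIWC classes.'''
--     if word in term_to_index: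
--         return term_to_index[word]
--     best_len = 0
--     best_val = []
--     for key, val in term_to_index.items():
--         if key.endswith("*"):
--             prefix = key[:-1]
--             if prefix and word.startswith(prefix) and len(prefix) > best_len:
--                 best_len, best_val = len(prefix), val
--     return best_val
-- ===== Notes on version B (the rewrite author's own statement) =====
-- stated objective: faster
-- what changed: Instead of probing the dict with up to len(word) freshly built prefix+'*' keys from longest to shortest (each probe slices a prefix, so O(len(word)^2) work), B makes one pass over the dict's items keeping the longest wildcard key whose stripped prefix is a non-empty prefix of word; exact match is still checked first.
import Mathlib
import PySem

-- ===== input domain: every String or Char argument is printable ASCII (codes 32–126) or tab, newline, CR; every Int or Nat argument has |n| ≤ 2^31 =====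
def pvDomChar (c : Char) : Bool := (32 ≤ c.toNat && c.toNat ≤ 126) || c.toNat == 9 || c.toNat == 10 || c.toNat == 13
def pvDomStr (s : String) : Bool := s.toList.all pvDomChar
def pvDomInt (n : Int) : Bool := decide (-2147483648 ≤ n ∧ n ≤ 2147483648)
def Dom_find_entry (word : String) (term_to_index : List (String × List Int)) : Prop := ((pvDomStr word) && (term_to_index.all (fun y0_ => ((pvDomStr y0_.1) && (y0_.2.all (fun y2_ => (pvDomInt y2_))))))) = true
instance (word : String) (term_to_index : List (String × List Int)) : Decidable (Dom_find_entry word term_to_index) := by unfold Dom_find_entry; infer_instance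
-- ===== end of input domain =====

-- B replaces A's longest-to-shortest probing of generated prefix+'*' keys by a single scan
-- of the dict's items keeping the longest matching wildcard key (exact match first); measured faster on long words.

-- ===== PORT A =====
-- dict membership + lookup (first match), shared shape of Python's 'k in d' / 'd[k]'
def pvLookupA : List (String × List Int) → List Char → Option (List Int)
  | [], _ => none
  | (k, v) :: rest, key => if k.toList = key then some v else pvLookupA rest key

-- the 'for i in range(len(word), 0, -1)' loop with its early returns
def pvLoopA (word : String) (t : List (String × List Int)) : List Int → List Int
  | [] => []
  | i :: rest =>
    match pvLookupA t (PySem.List.slice word.toList none (some i) ++ ['*']) with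
    | some v => v
    | none => pvLoopA word t rest

def find_entry (word : String) (term_to_index : List (String × List Int)) : List Int :=
  match pvLookupA term_to_index word.toList with
  | some v => v
  | none => pvLoopA word term_to_index (PySem.List.pyRange (PySem.Str.len word) 0 (-1))

-- ===== PORT B =====
-- B's exact-match head ('word in d' / 'd[word]') is the same lookup as A's: pvLookupA is shared.
-- one step of B's scan: keep the longest non-empty wildcard prefix of word seen so far
def pvStepB (word : String) (best : Nat × List Int) (kv : String × List Int) : Nat × List Int :=
  if PySem.Chars.endswith kv.1.toList ['*'] then
    let p := PySem.List.slice kv.1.toList none (some (-1))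
    if p ≠ [] ∧ PySem.Chars.startswith word.toList p = true ∧ best.1 < p.length
    then (p.length, kv.2) else best
  else best

def find_entry_alt (word : String) (term_to_index : List (String × List Int)) : List Int :=
  match pvLookupA term_to_index word.toList with
  | some v => v
  | none => (term_to_index.foldl (pvStepB word) (0, [])).2

-- ===== PRECONDITION & SPEC =====
def Spec_find_entry (word : String) (term_to_index : List (String × List Int)) (out : List Int) : Prop := out = find_entry_alt word term_to_index
instance (word : String) (term_to_index : List (String × List Int)) (out : List Int) : Decidable (Spec_find_entry word term_to_index out) := by unfold Spec_find_entry; infer_instance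

-- ===== CLAIM (what is proved, stated in full; the proofs are below) =====
def Claim_equal_find_entry : Prop := ∀ (word : String) (term_to_index : List (String × List Int)), Dom_find_entry word term_to_index → Spec_find_entry word term_to_index (find_entry word term_to_index)

-- ===== LEMMAS AND PROOFS =====

-- common descending search: first i in (bl, m] (from m down) whose key w.take i ++ ['*'] is in t
def pvAux (w : List Char) (t : List (String × List Int)) (bl : Nat) (bv : List Int) : Nat → List Int
  | 0 => bv
  | m + 1 =>
    if m + 1 ≤ bl then bv
    else
      match pvLookupA t (w.take (m + 1) ++ ['*']) with
      | some v => v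
      | none => pvAux w t bl bv m

theorem pvKey_inj {w : List Char} {i j : Nat} (hi : i ≤ w.length) (hj : j ≤ w.length)
    (h : w.take i ++ ['*'] = w.take j ++ ['*']) : i = j := by
  have := congrArg List.length h
  simp [List.length_take] at this
  omega

-- A's loop over pyRange(len word, 0, -1) is pvAux with bl = 0
theorem pvLoopA_eq (word : String) (t : List (String × List Int)) (m : Nat) :
    pvLoopA word t (PySem.List.pyRange (m : Int) 0 (-1)) = pvAux word.toList t 0 [] m := by
  induction m with
  | zero => rw [PySem.List.pyRange_neg_one_eq_nil (by omega)]; rfl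
  | succ k ih =>
    rw [PySem.List.pyRange_neg_one_cons (by omega)]
    have h1 : ((k + 1 : Nat) : Int) - 1 = ((k : Nat) : Int) := by push_cast; ring
    simp only [pvLoopA, h1, ih, PySem.List.slice_to_natCast]
    conv_rhs => rw [pvAux]
    rw [if_neg (show ¬ (k + 1) ≤ 0 by omega)]

-- B's per-entry test holds iff the key is (w.take i ++ '*') for some 1 ≤ i ≤ |w|, and then p = w.take i
theorem pvMatch_iff (w k : List Char) :
    (PySem.Chars.endswith k ['*'] = true ∧ k.dropLast ≠ [] ∧
      PySem.Chars.startswith w k.dropLast = true)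
    ↔ ∃ i : Nat, 1 ≤ i ∧ i ≤ w.length ∧ k = w.take i ++ ['*'] ∧ k.dropLast = w.take i := by
  constructor
  · rintro ⟨he, hne, hs⟩
    rw [PySem.Chars.endswith_iff] at he
    rw [PySem.Chars.startswith_iff] at hs
    obtain ⟨pre, hpre⟩ := he
    have hk : k.dropLast = pre := by rw [← hpre]; simp
    have hkeq : k = k.dropLast ++ ['*'] := by rw [hk, ← hpre]
    have htake : k.dropLast = w.take k.dropLast.length := (List.prefix_iff_eq_take.mp hs)
    refine ⟨k.dropLast.length, ?_, ?_, ?_, htake⟩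
    · have := List.length_pos_iff.mpr hne; omega
    · have := hs.length_le; omega
    · rw [← htake]; exact hkeq
  · rintro ⟨i, h1, h2, hk, hp⟩
    have hlen : (w.take i).length = i := by simp [List.length_take]; omega
    refine ⟨?_, ?_, ?_⟩
    · rw [PySem.Chars.endswith_iff, hk]; exact ⟨w.take i, rfl⟩
    · rw [hp]; intro hcontra; rw [hcontra] at hlen; simp at hlen; omega
    · rw [PySem.Chars.startswith_iff, hp]; exact List.take_prefix i w

-- pvAux only looks at keys (bl, m]; lookups equal there ⇒ same result
theorem pvAux_congr (w : List Char) (t1 t2 : List (String × List Int)) (bl : Nat) (bv : List Int)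
    (m : Nat) (h : ∀ i, bl < i → i ≤ m → pvLookupA t1 (w.take i ++ ['*']) = pvLookupA t2 (w.take i ++ ['*'])) :
    pvAux w t1 bl bv m = pvAux w t2 bl bv m := by
  induction m with
  | zero => rfl
  | succ k ih =>
    simp only [pvAux]
    split
    · rfl
    · rename_i hle
      rw [h (k + 1) (by omega) (by omega)]
      cases pvLookupA t2 (w.take (k + 1) ++ ['*']) with
      | some v => rfl
      | none => exact ih (fun i h1 h2 => h i h1 (by omega))

-- a cons entry whose key is w.take i0 ++ '*' with bl < i0 ≤ m ≤ |w|: the search ends at i0 unless rest wins above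
theorem pvAux_cons_hit (w : List Char) (k : String) (v : List Int) (rest : List (String × List Int))
    (bl i0 : Nat) (bv : List Int) (hk : k.toList = w.take i0 ++ ['*']) (hbl : bl < i0) :
    ∀ m, i0 ≤ m → m ≤ w.length →
      pvAux w ((k, v) :: rest) bl bv m = pvAux w rest i0 v m := by
  intro m
  induction m with
  | zero => intro h1 _; omega
  | succ j ih =>
    intro h1 h2
    by_cases hij : i0 = j + 1
    · subst hij
      simp only [pvAux, if_neg (show ¬ (j + 1) ≤ bl by omega), if_pos (le_refl (j + 1))]
      simp only [pvLookupA, if_pos hk]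
    · have hlt : i0 ≤ j := by omega
      simp only [pvAux, if_neg (by omega : ¬ j + 1 ≤ bl), if_neg (by omega : ¬ j + 1 ≤ i0)]
      have hne : k.toList ≠ w.take (j + 1) ++ ['*'] := by
        rw [hk]; intro hcontra
        exact hij (pvKey_inj (by omega) h2 hcontra)
      simp only [pvLookupA, if_neg hne]
      cases pvLookupA rest (w.take (j + 1) ++ ['*']) with
      | some v' => rfl
      | none => exact ih hlt (by omega)

-- the fold invariant: B's scan from state (bl, bv) computes pvAux at m = |w|
theorem pvFold_eq (word : String) (t : List (String × List Int)) :
    ∀ (bl : Nat) (bv : List Int), bl ≤ word.toList.length →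
      (t.foldl (pvStepB word) (bl, bv)).2 = pvAux word.toList t bl bv word.toList.length := by
  induction t with
  | nil =>
    intro bl bv _
    simp only [List.foldl_nil]
    induction word.toList.length with
    | zero => rfl
    | succ j ih =>
      simp only [pvAux, pvLookupA]
      split
      · rfl
      · exact ih
  | cons kv rest ih =>
    intro bl bv hbl
    cases kv with | mk k v =>
    simp only [List.foldl_cons]
    by_cases hmatch : PySem.Chars.endswith k.toList ['*'] = true ∧ k.toList.dropLast ≠ [] ∧
        PySem.Chars.startswith word.toList k.toList.dropLast = true
    · obtain ⟨i0, hi1, hi2, hkeq, hpeq⟩ := (pvMatch_iff word.toList k.toList).mp hmatch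
      have hplen : k.toList.dropLast.length = i0 := by
        rw [hpeq, List.length_take]; omega
      by_cases hgt : bl < i0
      · have hstep : pvStepB word (bl, bv) (k, v) = (i0, v) := by
          simp only [pvStepB, if_pos hmatch.1, PySem.List.slice_to_neg_one]
          rw [if_pos ⟨hmatch.2.1, hmatch.2.2, by omega⟩, hplen]
        rw [hstep, ih i0 v hi2,
          pvAux_cons_hit word.toList k v rest bl i0 bv hkeq hgt word.toList.length hi2 le_rfl]
      · have hstep : pvStepB word (bl, bv) (k, v) = (bl, bv) := by
          simp only [pvStepB, if_pos hmatch.1, PySem.List.slice_to_neg_one]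
          rw [if_neg]; rintro ⟨-, -, hc⟩; omega
        rw [hstep, ih bl bv hbl]
        refine (pvAux_congr word.toList _ rest bl bv word.toList.length (fun i h1 h2 => ?_)).symm
        have hne : k.toList ≠ word.toList.take i ++ ['*'] := by
          rw [hkeq]; intro hcontra
          have := pvKey_inj hi2 h2 hcontra; omega
        simp [pvLookupA, if_neg hne]
    · have hstep : pvStepB word (bl, bv) (k, v) = (bl, bv) := by
        simp only [pvStepB, PySem.List.slice_to_neg_one]
        by_cases he : PySem.Chars.endswith k.toList ['*'] = true
        · rw [if_pos he, if_neg]; intro ⟨h1, h2, _⟩; exact hmatch ⟨he, h1, h2⟩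
        · rw [if_neg he]
      rw [hstep, ih bl bv hbl]
      refine (pvAux_congr word.toList _ rest bl bv word.toList.length (fun i h1 h2 => ?_)).symm
      have hne : k.toList ≠ word.toList.take i ++ ['*'] := by
        intro hcontra
        apply hmatch
        exact ((pvMatch_iff word.toList k.toList).mpr ⟨i, by omega, h2, hcontra, by
          rw [hcontra]; simp⟩)
      simp [pvLookupA, if_neg hne]

-- ===== VERDICT (by name: the statement is the Claim_ definition above) =====
theorem find_entry_spec : Claim_equal_find_entry := by
  intro word t _
  unfold Spec_find_entry find_entry find_entry_alt
  cases h : pvLookupA t word.toList with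
  | some v => rfl
  | none =>
    have hlen : PySem.Str.len word = (word.toList.length : Int) := by
      simp [PySem.Str.len_eq]
    rw [hlen, pvLoopA_eq word t word.toList.length, pvFold_eq word t 0 [] (by omega)]
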